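-- pv_equiv track=rewrite | github.com/EnricoPicci/cobol-data-structure-py | src/cobol_data_structure/preprocessor.py | extract_data_division
-- ===== SOURCE A (Python) =====
-- def extract_data_division(lines: list[str]) -> list[str]:
--     """Extract only the DATA DIVISION section from preprocessed lines.
--
--     Args:
--         lines: Preprocessed COBOL lines
--
--     Returns:
--         Lines from DATA DIVISION only (excluding the header)
--     """
--     in_data_division = False
--     result: list[str] = []
--
--     for line in lines:
--         line_upper = line.upper().strip()
--
--         # Check for DATA DIVISION start
--         if "DATA DIVISION" in line_upper:
--             in_data_division = True
--             continue
--
--         # Check for next division (end of DATA DIVISION)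
--         if in_data_division:
--             if any(
--                 div in line_upper
--                 for div in [
--                     "PROCEDURE DIVISION",
--                     "ENVIRONMENT DIVISION",
--                     "IDENTIFICATION DIVISION",
--                 ]
--             ):
--                 break
--
--             # Skip section headers within DATA DIVISION
--             if any(
--                 sect in line_upper
--                 for sect in [
--                     "WORKING-STORAGE SECTION",
--                     "FILE SECTION",
--                     "LINKAGE SECTION",
--                     "LOCAL-STORAGE SECTION",
--                     "COMMUNICATION SECTION",
--                     "REPORT SECTION",
--                     "SCREEN SECTION",
--                 ]
--             ):
--                 continue
--
--             # Skip empty lines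
--             if line.strip():
--                 result.append(line)
--
--     return result
-- ===== SOURCE B (Python) =====
-- CLOSERS = ["PROCEDURE DIVISION", "ENVIRONMENT DIVISION", "IDENTIFICATION DIVISION"]
-- SECTIONS = [
--     "WORKING-STORAGE SECTION",
--     "FILE SECTION",
--     "LINKAGE SECTION",
--     "LOCAL-STORAGE SECTION",
--     "COMMUNICATION SECTION",
--     "REPORT SECTION",
--     "SCREEN SECTION",
-- ]
--
--
-- def extract_data_division(lines: list[str]) -> list[str]:
--     """Locate the DATA DIVISION header, cut the body at the next division
--     header, then keep the meaningful lines of that slice."""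
--     start = 0
--     while start < len(lines) and "DATA DIVISION" not in lines[start].upper().strip():
--         start += 1
--     if start == len(lines):
--         return []
--     body: list[str] = []
--     for line in lines[start + 1:]:
--         if any(c in line.upper().strip() for c in CLOSERS):
--             break
--         body.append(line)
--     return [
--         line
--         for line in body
--         if line.strip() and not any(s in line.upper().strip() for s in SECTIONS)
--     ]
-- ===== Notes on version B (the rewrite author's own statement) =====
-- stated objective: simpler
-- what changed: Replaces A's one-pass state machine (in_data_division flag with break/continue) by a locate-then-filter decomposition: find the DATA DIVISION header, cut the body at the next closing division, then keep the meaningful lines of that slice; Pre_ excludes inputs where 'DATA DIVISION' occurs on more than one line, a corner where what counts as body vs. repeated marker is ambiguous and A's re-checking of the marker on every line gives one of two defensible readings.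
import Mathlib
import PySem

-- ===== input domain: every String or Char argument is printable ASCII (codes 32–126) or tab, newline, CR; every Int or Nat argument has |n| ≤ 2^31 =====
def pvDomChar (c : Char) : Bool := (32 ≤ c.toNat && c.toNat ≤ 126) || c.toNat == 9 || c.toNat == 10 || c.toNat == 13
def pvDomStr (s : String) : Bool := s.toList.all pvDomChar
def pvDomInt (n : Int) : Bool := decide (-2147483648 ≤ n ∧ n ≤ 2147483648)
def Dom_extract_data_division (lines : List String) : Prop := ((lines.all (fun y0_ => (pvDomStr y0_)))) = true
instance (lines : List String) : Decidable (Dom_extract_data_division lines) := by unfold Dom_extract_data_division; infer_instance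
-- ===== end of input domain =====

-- B replaces A's interleaved state machine by locate-then-filter (find the header,
-- cut the body at the next closing division, filter the slice); objective: simpler.

-- ===== PORT A =====
def pvClosers : List String :=
  ["PROCEDURE DIVISION", "ENVIRONMENT DIVISION", "IDENTIFICATION DIVISION"]

def pvSections : List String :=
  ["WORKING-STORAGE SECTION", "FILE SECTION", "LINKAGE SECTION",
   "LOCAL-STORAGE SECTION", "COMMUNICATION SECTION", "REPORT SECTION",
   "SCREEN SECTION"]

-- A's for-loop with break/continue, state = (in_data_division, result)
def pvLoopA : List String → Bool → List String → List String
  | [], _, result => result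
  | line :: rest, inDD, result =>
    let u := PySem.Str.strip (PySem.Str.upper line)
    if PySem.Str.isIn "DATA DIVISION" u then
      pvLoopA rest true result
    else if inDD then
      if pvClosers.any (fun d => PySem.Str.isIn d u) then result   -- break
      else if pvSections.any (fun s => PySem.Str.isIn s u) then
        pvLoopA rest inDD result                                   -- continue
      else if PySem.Str.strip line != "" then
        pvLoopA rest inDD (result ++ [line])
      else
        pvLoopA rest inDD result
    else
      pvLoopA rest inDD result

def extract_data_division (lines : List String) : List String :=
  pvLoopA lines false []

-- ===== PORT B =====
-- the while loop locating the first DATA DIVISION header (returns the tail from it)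
def pvFindTail : List String → List String
  | [] => []
  | line :: rest =>
    if PySem.Str.isIn "DATA DIVISION" (PySem.Str.strip (PySem.Str.upper line)) then
      line :: rest
    else
      pvFindTail rest

-- the for-loop cutting the body at the first closing division
def pvCutBody : List String → List String
  | [] => []
  | line :: rest =>
    if pvClosers.any (fun c => PySem.Str.isIn c (PySem.Str.strip (PySem.Str.upper line))) then
      []
    else
      line :: pvCutBody rest

-- the final comprehension's predicate
def pvKeep (line : String) : Bool :=
  PySem.Str.strip line != "" &&
  !pvSections.any (fun s => PySem.Str.isIn s (PySem.Str.strip (PySem.Str.upper line)))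

def extract_data_division_alt (lines : List String) : List String :=
  match pvFindTail lines with
  | [] => []
  | _ :: rest => (pvCutBody rest).filter pvKeep

-- ===== PRECONDITION & SPEC =====
-- does a line's upper-stripped form mention the DATA DIVISION marker?
def pvHasDD (line : String) : Bool :=
  PySem.Str.isIn "DATA DIVISION" (PySem.Str.strip (PySem.Str.upper line))

-- Pre_ excludes inputs where 'DATA DIVISION' occurs on more than one line: whether such a
-- repeated marker line is body text or a marker is an unspecified corner (A re-checks the
-- marker on every line, B treats only the first occurrence as the header).
def Pre_extract_data_division (lines : List String) : Prop :=
  lines.countP (fun l => pvHasDD l) ≤ 1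
instance (lines : List String) : Decidable (Pre_extract_data_division lines) := by
  unfold Pre_extract_data_division; infer_instance

def pvWitness_extract_data_division : List String :=
  ["DATA DIVISION.", "WORKING-STORAGE SECTION.", "01 X PIC 9.", "", "PROCEDURE DIVISION.", "MOVE 1 TO X."]

def Spec_extract_data_division (lines : List String) (out : List String) : Prop := out = extract_data_division_alt lines
instance (lines : List String) (out : List String) : Decidable (Spec_extract_data_division lines out) := by unfold Spec_extract_data_division; infer_instance

-- ===== CLAIM (what is proved, stated in full; the proofs are below) =====
def Claim_equal_extract_data_division : Prop := ∀ (lines : List String), Dom_extract_data_division lines → Pre_extract_data_division lines → Spec_extract_data_division lines (extract_data_division lines)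

-- ===== LEMMAS AND PROOFS =====

-- once inside the DATA DIVISION, if no later line mentions the marker again,
-- A's loop appends exactly B's filtered cut body
theorem pvLoopA_true (rest : List String) (h : ∀ l ∈ rest, pvHasDD l = false) :
    ∀ result : List String,
    pvLoopA rest true result = result ++ (pvCutBody rest).filter pvKeep := by
  induction rest with
  | nil => intro result; simp [pvLoopA, pvCutBody]
  | cons line rest ih =>
    intro result
    have hdd : pvHasDD line = false := h line (by simp)
    have hrest : ∀ l ∈ rest, pvHasDD l = false := fun l hl => h l (by simp [hl])
    unfold pvHasDD at hdd
    simp at hdd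
    by_cases hcl : ∃ x ∈ pvClosers, PySem.Chars.isIn x.toList (PySem.Chars.strip (PySem.Chars.upper line.toList)) = true
    · simp [pvLoopA, pvCutBody, hdd, hcl]
    · by_cases hse : ∃ x ∈ pvSections, PySem.Chars.isIn x.toList (PySem.Chars.strip (PySem.Chars.upper line.toList)) = true
      · simp [pvLoopA, pvCutBody, pvKeep, hdd, hcl, hse, List.filter_cons, ih hrest]
      · by_cases hst : PySem.Str.strip line = ""
        · simp [pvLoopA, pvCutBody, pvKeep, hdd, hcl, hse, hst, List.filter_cons, ih hrest]
        · simp [pvLoopA, pvCutBody, pvKeep, hdd, hcl, hse, hst, List.filter_cons, ih hrest]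

theorem pvLoopA_false (lines : List String) (h : lines.countP (fun l => pvHasDD l) ≤ 1) :
    pvLoopA lines false [] = extract_data_division_alt lines := by
  induction lines with
  | nil => simp [pvLoopA, extract_data_division_alt, pvFindTail]
  | cons line rest ih =>
    rw [List.countP_cons] at h
    by_cases hdd : pvHasDD line = true
    · have hc0 : rest.countP (fun l => pvHasDD l) = 0 := by
        simp only [hdd, if_pos] at h
        omega
      have hrest : ∀ l ∈ rest, pvHasDD l = false := by
        intro l hl
        have := List.countP_eq_zero.mp hc0 l hl
        simpa using this
      have hdd' := hdd
      unfold pvHasDD at hdd'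
      simp at hdd'
      simp [pvLoopA, extract_data_division_alt, pvFindTail, hdd', pvLoopA_true rest hrest]
    · have hdd0 : pvHasDD line = false := by simpa using hdd
      have hrest : rest.countP (fun l => pvHasDD l) ≤ 1 := by
        simp only [hdd0] at h
        omega
      have hdd' := hdd0
      unfold pvHasDD at hdd'
      simp at hdd'
      have e1 : pvLoopA (line :: rest) false [] = pvLoopA rest false [] := by
        simp [pvLoopA, hdd']
      have e2 : extract_data_division_alt (line :: rest) = extract_data_division_alt rest := by
        simp [extract_data_division_alt, pvFindTail, hdd']
      rw [e1, e2]
      exact ih hrest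

-- ===== VERDICT (by name: the statement is the Claim_ definition above) =====
theorem extract_data_division_spec : Claim_equal_extract_data_division := by
  intro lines _ hpre
  unfold Spec_extract_data_division extract_data_division
  exact pvLoopA_false lines hpre
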